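-- pv_equiv track=rewrite | github.com/aakashdandekar/Password-Generation-Game | rule.py | rule15_country_code
-- ===== SOURCE A (Python) =====
-- def rule15_country_code(string):
--     try:
--         country_codes = [
--             'US', 'GB', 'CN', 'FR', 'IN', 'RU', 'DE', 'BR', 'JP', 'IT',
--             'AU', 'CA', 'MX', 'KR', 'ES', 'TR', 'NL', 'CH', 'SE', 'BE',
--             'NO', 'FI', 'DK', 'PL', 'CZ', 'ZA', 'EG', 'NG', 'AR', 'CO',
--             'CL', 'PE', 'VE', 'MY', 'TH', 'PH', 'SG', 'ID', 'VN', 'UA',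
--             'IL', 'SA', 'AE', 'NZ', 'IE', 'PT', 'AT', 'HU', 'GR', 'RO',
--             'HR', 'SK', 'SI', 'BG', 'RS', 'LT', 'LV', 'EE', 'LU', 'MT',
--             'IS', 'CY', 'QA', 'KW', 'OM', 'BH', 'JO', 'LB', 'SY', 'IQ',
--             'IR', 'PK', 'AF', 'BD', 'NP', 'LK', 'MM', 'KH', 'LA', 'MN',
--             'UZ', 'KZ', 'GE', 'AM', 'AZ', 'TJ', 'TM', 'KG', 'MD', 'BY',
--             'AL', 'BA', 'MK', 'ME', 'XK', 'DZ', 'TN', 'MA', 'SN', 'NE',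
--             'ML', 'ZM', 'ZW', 'GH', 'CI', 'CM', 'UG', 'KE', 'TZ', 'ET',
--             'SD', 'SS', 'RW', 'DJ', 'SO', 'LS', 'SZ', 'NA'
--         ]
--
--         for elem in country_codes:
--             if elem in string:
--                 return True
--
--             else:
--                 continue
--
--     except:
--         return False
-- ===== SOURCE B (Python) =====
-- _CODES = ("USGBCNFRINRUDEBRJPITAUCAMXKRESTRNLCHSEBE"
--           "NOFIDKPLCZZAEGNGARCOCLPEVEMYTHPHSGIDVNUA"
--           "ILSAAENZIEPTATHUGRROHRSKSIBGRSLTLVEELUMT"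
--           "ISCYQAKWOMBHJOLBSYIQIRPKAFBDNPLKMMKHLAMN"
--           "UZKZGEAMAZTJTMKGMDBYALBAMKMEXKDZTNMASNNE"
--           "MLZMZWGHCICMUGKETZETSDSSRWDJSOLSSZNA")
--
-- def rule15_country_code(string):
--     try:
--         codes = [_CODES[j:j + 2] for j in range(0, len(_CODES), 2)]
--         for i in range(len(string) - 1):
--             if string[i:i + 2] in codes:
--                 return True
--     except:
--         return False
-- ===== Notes on version B (the rewrite author's own statement) =====
-- stated objective: alternative
-- what changed: B stores the codes as one packed 236-character string chunked into 2-letter codes, and scans the input's 2-character windows once testing each window against that list, instead of A's running a full substring search of each of the 118 codes against the whole string; the outer/inner traversal is inverted and the code table is a different data representation.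
import Mathlib
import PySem

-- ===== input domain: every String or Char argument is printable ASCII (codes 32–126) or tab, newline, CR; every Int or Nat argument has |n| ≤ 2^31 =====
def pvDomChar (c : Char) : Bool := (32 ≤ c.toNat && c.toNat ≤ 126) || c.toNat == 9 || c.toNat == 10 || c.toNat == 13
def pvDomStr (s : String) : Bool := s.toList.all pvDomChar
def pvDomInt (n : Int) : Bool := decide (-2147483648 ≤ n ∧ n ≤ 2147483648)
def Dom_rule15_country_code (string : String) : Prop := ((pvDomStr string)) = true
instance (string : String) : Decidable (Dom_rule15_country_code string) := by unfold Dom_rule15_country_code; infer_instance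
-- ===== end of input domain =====

-- B stores the codes as one packed string chunked into 2-letter codes and scans the input's
-- 2-character windows once testing each window against that list, instead of A's searching
-- each of the 118 codes in the whole string (objective: alternative decomposition, same cost).


-- ===== PORT A =====
-- the literal country_codes list A contains
def pvCodes : List String := [
  "US", "GB", "CN", "FR", "IN", "RU", "DE", "BR", "JP", "IT",
  "AU", "CA", "MX", "KR", "ES", "TR", "NL", "CH", "SE", "BE",
  "NO", "FI", "DK", "PL", "CZ", "ZA", "EG", "NG", "AR", "CO",
  "CL", "PE", "VE", "MY", "TH", "PH", "SG", "ID", "VN", "UA",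
  "IL", "SA", "AE", "NZ", "IE", "PT", "AT", "HU", "GR", "RO",
  "HR", "SK", "SI", "BG", "RS", "LT", "LV", "EE", "LU", "MT",
  "IS", "CY", "QA", "KW", "OM", "BH", "JO", "LB", "SY", "IQ",
  "IR", "PK", "AF", "BD", "NP", "LK", "MM", "KH", "LA", "MN",
  "UZ", "KZ", "GE", "AM", "AZ", "TJ", "TM", "KG", "MD", "BY",
  "AL", "BA", "MK", "ME", "XK", "DZ", "TN", "MA", "SN", "NE",
  "ML", "ZM", "ZW", "GH", "CI", "CM", "UG", "KE", "TZ", "ET",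
  "SD", "SS", "RW", "DJ", "SO", "LS", "SZ", "NA"]

-- A's loop: for elem in country_codes: if elem in string: return True; falls through to None
def pvLoopA (cs : List String) (s : String) : Option Bool :=
  match cs with
  | [] => none
  | c :: rest => if PySem.Str.isIn c s then some true else pvLoopA rest s

def rule15_country_code (string : String) : Option Bool := pvLoopA pvCodes string

-- ===== PORT B =====
-- B's packed table _CODES: one 236-character string, two letters per country code
def pvCodesStr : String :=
  "USGBCNFRINRUDEBRJPITAUCAMXKRESTRNLCHSEBENOFIDKPLCZZAEGNGARCOCLPEVEMYTHPHSGIDVNUAILSAAENZIEPTATHUGRROHRSKSIBGRSLTLVEELUMTISCYQAKWOMBHJOLBSYIQIRPKAFBDNPLKMMKHLAMNUZKZGEAMAZTJTMKGMDBYALBAMKMEXKDZTNMASNNEMLZMZWGHCICMUGKETZETSDSSRWDJSOLSSZNA"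

-- the comprehension [_CODES[j:j+2] for j in range(0, len(_CODES), 2)]: chunk into pairs
def pvChunk2 (l : List Char) : List String :=
  match l with
  | a :: b :: rest => String.ofList [a, b] :: pvChunk2 rest
  | _ => []

-- B's loop: for i in range(len(string)-1): if string[i:i+2] in codes: return True;
-- ported as structural recursion over the character list, one 2-char window per step
def pvLoopB (codes : List String) (l : List Char) : Option Bool :=
  match l with
  | c1 :: c2 :: rest =>
      if codes.contains (String.ofList [c1, c2]) then some true
      else pvLoopB codes (c2 :: rest)
  | _ => none

def rule15_country_code_alt (string : String) : Option Bool :=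
  pvLoopB (pvChunk2 pvCodesStr.toList) string.toList

-- ===== PRECONDITION & SPEC =====
def Spec_rule15_country_code (string : String) (out : Option Bool) : Prop := out = rule15_country_code_alt string
instance (string : String) (out : Option Bool) : Decidable (Spec_rule15_country_code string out) := by unfold Spec_rule15_country_code; infer_instance

-- ===== CLAIM (what is proved, stated in full; the proofs are below) =====
def Claim_equal_rule15_country_code : Prop := ∀ (string : String), Dom_rule15_country_code string → Spec_rule15_country_code string (rule15_country_code string)

-- ===== LEMMAS AND PROOFS =====

-- B's chunked table is exactly A's code list
set_option maxRecDepth 4000 in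
theorem pvChunk2_codes : pvChunk2 pvCodesStr.toList = pvCodes := by decide

theorem pvCodes_len2 : ∀ c ∈ pvCodes, ∃ a b, c.toList = [a, b] := by
  have h : pvCodes.all (fun c => c.toList.length == 2) = true := by decide
  intro c hc
  have h2 : c.toList.length = 2 := by
    simpa using List.all_eq_true.mp h c hc
  match hl : c.toList with
  | [a, b] => exact ⟨a, b, rfl⟩
  | [] | [_] | _ :: _ :: _ :: _ => simp [hl] at h2

-- A's loop is the search for a code occurring as an infix
theorem pvLoopA_eq (cs : List String) (s : String) :
    pvLoopA cs s = if cs.any (fun c => PySem.Chars.isIn c.toList s.toList) then some true else none := by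
  induction cs with
  | nil => simp [pvLoopA]
  | cons c rest ih =>
    simp only [pvLoopA, List.any_cons, PySem.Str.isIn_eq, ih]
    by_cases h : PySem.Chars.isIn c.toList s.toList = true <;> simp [h]

-- the window test at the head of a ≥2-element list, expressed on the any-search
theorem any_infix_cons (x y : Char) (rest : List Char) :
    (pvCodes.any (fun c => PySem.Chars.isIn c.toList (x :: y :: rest))) =
      (pvCodes.contains (String.ofList [x, y]) ||
       pvCodes.any (fun c => PySem.Chars.isIn c.toList (y :: rest))) := by
  rw [Bool.eq_iff_iff]
  simp only [List.any_eq_true, Bool.or_eq_true, List.contains_iff_mem,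
    PySem.Chars.isIn_iff_infix]
  constructor
  · rintro ⟨c, hc, hinf⟩
    obtain ⟨a, b, hab⟩ := pvCodes_len2 c hc
    rw [hab] at hinf
    rcases List.infix_cons_iff.mp hinf with hpre | hinf'
    · have : a = x ∧ b = y := by
        simpa [List.cons_prefix_cons] using hpre
      left
      have hc' : String.ofList [x, y] = c := by
        calc String.ofList [x, y] = String.ofList c.toList := by rw [hab, this.1, this.2]
          _ = c := String.ofList_toList
      rwa [hc']
    · right; exact ⟨c, hc, by rw [hab]; exact hinf'⟩
  · rintro (hmem | ⟨c, hc, hinf⟩)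
    · refine ⟨String.ofList [x, y], hmem, ?_⟩
      rw [String.toList_ofList]
      exact List.infix_cons_iff.mpr (Or.inl (by simp [List.cons_prefix_cons]))
    · exact ⟨c, hc, hinf.trans (List.suffix_cons x _).isInfix⟩

-- no length-2 code is an infix of a list of length < 2
theorem any_infix_short (l : List Char) (hlen : l.length ≤ 1) :
    (pvCodes.any (fun c => PySem.Chars.isIn c.toList l)) = false := by
  rw [Bool.eq_false_iff]
  intro h
  obtain ⟨c, hc, hinf⟩ := List.any_eq_true.mp h
  obtain ⟨a, b, hab⟩ := pvCodes_len2 c hc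
  rw [PySem.Chars.isIn_iff_infix, hab] at hinf
  have := hinf.length_le
  simp at this
  omega

-- B's loop over the chunked table computes the same any-search
theorem pvLoopB_eq : ∀ l : List Char,
    pvLoopB pvCodes l = if pvCodes.any (fun c => PySem.Chars.isIn c.toList l) then some true else none := by
  intro l
  induction l with
  | nil => simp [pvLoopB, any_infix_short [] (by simp)]
  | cons x t ih =>
    match t with
    | [] => simp [pvLoopB, any_infix_short [x] (by simp)]
    | y :: rest =>
      rw [pvLoopB, ih, any_infix_cons]
      by_cases h : String.ofList [x, y] ∈ pvCodes <;>
        simp [h]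

-- ===== VERDICT (by name: the statement is the Claim_ definition above) =====
theorem rule15_country_code_spec : Claim_equal_rule15_country_code := by
  intro s _
  unfold Spec_rule15_country_code rule15_country_code rule15_country_code_alt
  rw [pvChunk2_codes, pvLoopA_eq, pvLoopB_eq]
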